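-- pv_equiv track=rewrite | github.com/phbradley/TCRdock | tcrdock/sequtil.py | count_peptide_mismatches
-- ===== SOURCE A (Python) =====
-- def count_peptide_mismatches(a,b):
--     if len(a)>len(b):
--         return count_peptide_mismatches(b,a)
--     lendiff = len(b)-len(a)
--     assert lendiff>=0
--     min_mismatches = len(a)
--     for shift in range(lendiff+1):
--         mismatches = sum(x!=y for x,y in zip(a,b[shift:]))
--         if mismatches < min_mismatches:
--             min_mismatches = mismatches
--     # also allow bulging out in the middle
--     nt = len(a)//2
--     ct = len(a) - nt
--     btrim = b[:nt]+b[-ct:]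
--     assert len(btrim) == len(a)
--     mismatches = sum(x!=y for x,y in zip(a,btrim))
--     if mismatches < min_mismatches:
--         min_mismatches = mismatches
--     return min_mismatches
-- ===== SOURCE B (Python) =====
-- def count_peptide_mismatches(a, b):
--     # Diagonal match counting: index a's characters by position once, then a single
--     # pass over b credits each matching (i, j) pair to its shift s = j - i; the
--     # per-shift inner scan of a disappears.  Separate bulge term, as in the spec.
--     if len(a) > len(b):
--         a, b = b, a
--     n, m = len(a), len(b)
--     lendiff = m - n
--     pos = {}
--     for i, c in enumerate(a):
--         pos.setdefault(c, []).append(i)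
--     matches = [0] * (lendiff + 1)
--     for j in range(m):
--         for i in pos.get(b[j], []):
--             s = j - i
--             if 0 <= s <= lendiff:
--                 matches[s] += 1
--     best = n - max(matches, default=0)
--     nt = n // 2
--     bulge = 0
--     for i in range(n):
--         if a[i] != (b[i] if i < nt else b[lendiff + i]):
--             bulge += 1
--     return min(best, bulge)
-- ===== Notes on version B (the rewrite author's own statement) =====
-- stated objective: alternative
-- what changed: A rescans all of a for every shift (and recurses to order the arguments); B builds a per-character position index of the shorter string once and makes a single pass over the longer string, crediting each matching character pair to its shift's diagonal counter, so the per-shift inner scan disappears; the bulge term is a direct indexed pass.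
import Mathlib
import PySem

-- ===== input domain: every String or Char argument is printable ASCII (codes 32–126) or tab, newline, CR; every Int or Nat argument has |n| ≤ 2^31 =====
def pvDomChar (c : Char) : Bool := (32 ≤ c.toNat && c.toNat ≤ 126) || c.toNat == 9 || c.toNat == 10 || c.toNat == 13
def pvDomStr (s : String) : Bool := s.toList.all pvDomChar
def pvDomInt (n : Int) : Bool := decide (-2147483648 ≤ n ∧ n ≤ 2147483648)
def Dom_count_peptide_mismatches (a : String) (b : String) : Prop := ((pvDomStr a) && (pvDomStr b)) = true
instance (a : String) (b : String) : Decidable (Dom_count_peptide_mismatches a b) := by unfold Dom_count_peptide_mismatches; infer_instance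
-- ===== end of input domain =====

-- B replaces A's per-shift rescan by diagonal match counting through a per-character
-- position index of the shorter string (objective: alternative algorithm, same exact value).

-- ===== PORT A =====
def cpmGoA (X Y : List Char) : Int :=
  let lendiff : Int := (Y.length : Int) - (X.length : Int)
  let min0 : Int := (X.length : Int)
  let min1 : Int := (PySem.List.pyRange 0 (lendiff + 1) 1).foldl
    (fun min_mismatches shift =>
      let mismatches : Int :=
        ((X.zip (PySem.List.slice Y (some shift) none)).map
          (fun xy => if xy.1 ≠ xy.2 then (1 : Int) else 0)).sum
      if mismatches < min_mismatches then mismatches else min_mismatches) min0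
  let nt : Int := PySem.Int.floordiv (X.length : Int) 2
  let ct : Int := (X.length : Int) - nt
  let btrim : List Char := PySem.List.slice Y none (some nt) ++ PySem.List.slice Y (some (-ct)) none
  let mismatches : Int :=
    ((X.zip btrim).map (fun xy => if xy.1 ≠ xy.2 then (1 : Int) else 0)).sum
  if mismatches < min1 then mismatches else min1

def count_peptide_mismatches (a : String) (b : String) : Int :=
  if a.toList.length > b.toList.length then cpmGoA b.toList a.toList
  else cpmGoA a.toList b.toList

-- ===== PORT B =====
def cpmGoB (X Y : List Char) : Int :=
  let n : Int := (X.length : Int)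
  let m : Int := (Y.length : Int)
  let lendiff : Int := m - n
  let pos : PySem.Dict Char (List Int) :=
    (PySem.List.enumerate X 0).foldl
      (fun d ic => d.modify ic.2 [] (fun l => l ++ [ic.1])) PySem.Dict.empty
  let mtch0 : List Int := PySem.List.pyRepeat [0] (lendiff + 1)
  let mtch : List Int := (PySem.List.pyRange 0 m 1).foldl
    (fun ms j =>
      (pos.getD (PySem.List.pyGetD Y j ' ') []).foldl
        (fun ms i =>
          let s := j - i
          if 0 ≤ s ∧ s ≤ lendiff then
            PySem.List.pySetD ms s (PySem.List.pyGetD ms s 0 + 1)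
          else ms)
        ms) mtch0
  let best : Int := n - (PySem.List.max? mtch (fun x => x)).getD 0
  let nt : Int := PySem.Int.floordiv n 2
  let bulge : Int := (PySem.List.pyRange 0 n 1).foldl
    (fun acc i =>
      if PySem.List.pyGetD X i ' ' ≠
          (if i < nt then PySem.List.pyGetD Y i ' ' else PySem.List.pyGetD Y (lendiff + i) ' ')
      then acc + 1 else acc) 0
  min best bulge

def count_peptide_mismatches_alt (a : String) (b : String) : Int :=
  if a.toList.length > b.toList.length then cpmGoB b.toList a.toList
  else cpmGoB a.toList b.toList

-- ===== PRECONDITION & SPEC =====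
-- Pre_ excludes inputs where exactly one of the two strings is empty: there A's
-- 'assert len(btrim) == len(a)' fails (b[-0:] is the whole string), an AssertionError.
def Pre_count_peptide_mismatches (a : String) (b : String) : Prop := (a.toList = [] ↔ b.toList = [])
instance (a : String) (b : String) : Decidable (Pre_count_peptide_mismatches a b) := by
  unfold Pre_count_peptide_mismatches; infer_instance
def pvWitness_count_peptide_mismatches : String × String := ("AG", "AVG")

def Spec_count_peptide_mismatches (a : String) (b : String) (out : Int) : Prop :=
  out = count_peptide_mismatches_alt a b
instance (a : String) (b : String) (out : Int) : Decidable (Spec_count_peptide_mismatches a b out) := by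
  unfold Spec_count_peptide_mismatches; infer_instance

-- ===== CLAIM (what is proved, stated in full; the proofs are below) =====
def Claim_equal_count_peptide_mismatches : Prop := ∀ (a : String) (b : String),
  Dom_count_peptide_mismatches a b → Pre_count_peptide_mismatches a b →
  Spec_count_peptide_mismatches a b (count_peptide_mismatches a b)

-- ===== LEMMAS AND PROOFS =====

-- match count of X against Y shifted by s
def pvMc (X Y : List Char) (s : Nat) : Nat :=
  (X.zip (Y.drop s)).countP (fun p => p.1 == p.2)

-- partial diagonal count: contributions of b-positions j < J to shift s
def pvPc (X Y : List Char) (J s : Nat) : Nat :=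
  (List.range J).countP
    (fun j => decide (s ≤ j) && decide (j - s < X.length) && (X.getD (j - s) ' ' == Y.getD j ' '))

-- canonical common value of the two per-call bodies (X the shorter list)
def pvShiftMin (X Y : List Char) : Int :=
  (X.length : Int)
    - (List.range (Y.length - X.length + 1)).foldl (fun M s => max M ((pvMc X Y s : Int))) 0

def pvBulge (X Y : List Char) : Int :=
  (X.length : Int) - ((List.range X.length).countP
    (fun i => X.getD i ' ' ==
      (if i < X.length / 2 then Y.getD i ' ' else Y.getD (Y.length - X.length + i) ' ')) : Int)

-- 0/1-sum over a zipped list counts the matches away from the length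
theorem pv_sum_ite (l : List (Char × Char)) :
    (l.map (fun xy => if xy.1 ≠ xy.2 then (1 : Int) else 0)).sum
      = (l.length : Int) - (l.countP (fun p => p.1 == p.2) : Int) := by
  induction l with
  | nil => simp
  | cons p t ih =>
    simp only [List.map_cons, List.sum_cons, List.countP_cons, List.length_cons, ih]
    by_cases h : p.1 = p.2
    · simp only [h, ne_eq, not_true_eq_false, if_false, beq_self_eq_true, if_true]
      push_cast; ring
    · have hb : (p.1 == p.2) = false := by simp [h]
      simp only [ne_eq, h, not_false_eq_true, if_true, hb, if_false]
      push_cast; ring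

-- zip countP as a countP over indices
theorem pv_zip_countP (q : Char → Char → Bool) : ∀ (X Y : List Char),
    (X.zip Y).countP (fun p => q p.1 p.2)
      = (List.range (min X.length Y.length)).countP (fun i => q (X.getD i ' ') (Y.getD i ' ')) := by
  intro X
  induction X with
  | nil => intro Y; simp
  | cons x xs ih =>
    intro Y
    cases Y with
    | nil => simp
    | cons y ys =>
      have hmin : min (x :: xs).length (y :: ys).length = min xs.length ys.length + 1 := by
        simp only [List.length_cons]; omega
      rw [hmin, List.range_succ_eq_map]
      simp only [List.zip_cons_cons, List.countP_cons, List.countP_map, Function.comp_def,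
        List.getD_cons_succ, List.getD_cons_zero, ih ys]

-- running-min of (n - g s) is n minus the running-max of g
theorem pv_foldl_min_max (g : Nat → Int) (n : Int) : ∀ (L : List Nat) (M : Int),
    L.foldl (fun mn s => if n - g s < mn then n - g s else mn) (n - M)
      = n - L.foldl (fun mx s => max mx (g s)) M := by
  intro L
  induction L with
  | nil => intro M; simp
  | cons s t ih =>
    intro M
    simp only [List.foldl_cons]
    have h1 : (if n - g s < n - M then n - g s else n - M) = n - max M (g s) := by
      split_ifs <;> omega
    rw [h1, ih]

-- counting one hit in a range
theorem pv_countP_range_single (q : Nat → Bool) : ∀ (n t : Nat),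
    (List.range n).countP (fun k => decide (k = t) && q k) = if t < n ∧ q t = true then 1 else 0 := by
  intro n
  induction n with
  | zero => intro t; simp
  | succ n ih =>
    intro t
    rw [List.range_succ, List.countP_append, ih]
    simp only [List.countP_cons, List.countP_nil]
    by_cases h : n = t
    · subst h
      by_cases hq : q n = true <;> simp [hq, Nat.lt_irrefl, Nat.lt_succ_self]
    · have hf : (decide (n = t) && q n) = false := by simp [h]
      rw [hf]
      have heq : (t < n ∧ q t = true) ↔ (t < n + 1 ∧ q t = true) := by
        constructor
        · rintro ⟨h1, h2⟩; exact ⟨by omega, h2⟩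
        · rintro ⟨h1, h2⟩; exact ⟨by omega, h2⟩
      simp only [Bool.false_eq_true, if_false, Nat.add_zero]
      exact if_congr heq rfl rfl

-- the positions dict maps c to the ascending list of indices of c in X
theorem pv_pos_getD (X : List Char) (c : Char) :
    ((PySem.List.enumerate X 0).foldl
      (fun d ic => d.modify ic.2 [] (fun l => l ++ [ic.1])) PySem.Dict.empty).getD c []
    = ((List.range X.length).filter (fun k => X.getD k ' ' == c)).map (fun k : Nat => (k : Int)) := by
  rw [PySem.List.enumerate_eq_map_pyRange X ' ']
  simp only [PySem.List.len_eq]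
  rw [PySem.List.pyRange_zero_nat, List.map_map, List.foldl_map]
  simp only [Function.comp_def, PySem.List.pyGetD_natCast]
  have hswap : (List.range X.length).foldl
      (fun (d : PySem.Dict Char (List Int)) k => d.modify (X.getD k ' ') [] (fun l => l ++ [(k : Int)]))
      PySem.Dict.empty
      = ((List.range X.length).map (fun k => (X.getD k ' ', (k : Int)))).foldl
          (fun d p => d.modify p.1 [] (fun l => l ++ [p.2])) PySem.Dict.empty := by
    rw [List.foldl_map]
  rw [hswap, PySem.Dict.getD_foldl_modify_append]
  rw [List.filter_map, List.map_map]
  simp [Function.comp_def]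

-- inner fold over the position list: adds the diagonal hits at each shift entry
theorem pv_inner_fold (LD : Nat) (J : Int) : ∀ (l : List Int) (ms : List Int),
    ms.length = LD + 1 →
    (l.foldl (fun ms i =>
        if 0 ≤ J - i ∧ J - i ≤ (LD : Int) then
          PySem.List.pySetD ms (J - i) (PySem.List.pyGetD ms (J - i) 0 + 1)
        else ms) ms).length = LD + 1 ∧
    ∀ s : Nat, s ≤ LD →
      PySem.List.pyGetD (l.foldl (fun ms i =>
        if 0 ≤ J - i ∧ J - i ≤ (LD : Int) then
          PySem.List.pySetD ms (J - i) (PySem.List.pyGetD ms (J - i) 0 + 1)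
        else ms) ms) (s : Int) 0
        = PySem.List.pyGetD ms (s : Int) 0 + (l.countP (fun i => decide (i = J - (s : Int))) : Int) := by
  intro l
  induction l with
  | nil => intro ms hms; exact ⟨hms, fun s _ => by simp⟩
  | cons i t ih =>
    intro ms hms
    simp only [List.foldl_cons]
    by_cases hc : 0 ≤ J - i ∧ J - i ≤ (LD : Int)
    · rw [if_pos hc]
      have hset : PySem.List.pySetD ms (J - i) (PySem.List.pyGetD ms (J - i) 0 + 1)
          = ms.set (J - i).toNat (PySem.List.pyGetD ms (J - i) 0 + 1) :=
        PySem.List.pySetD_of_nonneg ms _ hc.1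
      have hlen' : (ms.set (J - i).toNat (PySem.List.pyGetD ms (J - i) 0 + 1)).length = LD + 1 := by
        simp [hms]
      rw [hset]
      obtain ⟨hl, he⟩ := ih _ hlen'
      refine ⟨hl, fun s hs => ?_⟩
      rw [he s hs, List.countP_cons]
      have hidx : (J - i).toNat < ms.length := by omega
      by_cases hse : (J - i).toNat = s
      · have hieq : (i = J - (s : Int)) := by omega
        have hdec : (decide (i = J - (s : Int))) = true := by simp [hieq]
        rw [hdec]
        have : PySem.List.pyGetD (ms.set (J - i).toNat (PySem.List.pyGetD ms (J - i) 0 + 1)) (s : Int) 0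
            = PySem.List.pyGetD ms (J - i) 0 + 1 := by
          rw [PySem.List.pyGetD_natCast, List.getD_eq_getElem?_getD, List.getElem?_set]
          have hsl : s < ms.length := hse ▸ hidx
          simp [hse, hsl]
        rw [this]
        have : PySem.List.pyGetD ms (J - i) 0 = PySem.List.pyGetD ms (s : Int) 0 := by
          congr 1; omega
        rw [this]
        push_cast
        split_ifs with hh
        · ring
        · simp at hh
      · have hne : ¬ (i = J - (s : Int)) := by omega
        have hdec : (decide (i = J - (s : Int))) = false := by simp [hne]
        rw [hdec]
        have : PySem.List.pyGetD (ms.set (J - i).toNat (PySem.List.pyGetD ms (J - i) 0 + 1)) (s : Int) 0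
            = PySem.List.pyGetD ms (s : Int) 0 := by
          rw [PySem.List.pyGetD_natCast, List.getD_eq_getElem?_getD, List.getElem?_set,
            PySem.List.pyGetD_natCast, List.getD_eq_getElem?_getD]
          simp [hse]
        rw [this]
        push_cast
        ring
    · rw [if_neg hc]
      obtain ⟨hl, he⟩ := ih ms hms
      refine ⟨hl, fun s hs => ?_⟩
      rw [he s hs, List.countP_cons]
      have hne : ¬ (i = J - (s : Int)) := by omega
      have hdec : (decide (i = J - (s : Int))) = false := by simp [hne]
      rw [hdec]
      push_cast
      ring

-- hit count of the position list of c on the diagonal through (J, s)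
theorem pv_hit_count (X : List Char) (c : Char) (J s : Nat) :
    (((List.range X.length).filter (fun k => X.getD k ' ' == c)).map (fun k : Nat => (k : Int))).countP
        (fun i => decide (i = (J : Int) - (s : Int)))
      = if s ≤ J ∧ J - s < X.length ∧ (X.getD (J - s) ' ' == c) = true then 1 else 0 := by
  rw [List.countP_map, List.countP_filter]
  by_cases hsJ : s ≤ J
  · have hcg : ∀ k ∈ List.range X.length,
        (((fun i => decide (i = (J : Int) - (s : Int))) ∘ (fun k : Nat => (k : Int))) k
            && (X.getD k ' ' == c)) = true
          ↔ ((decide (k = J - s) && (X.getD k ' ' == c)) = true) := by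
      intro k _
      have hd : (decide ((k : Int) = (J : Int) - (s : Int))) = (decide (k = J - s)) := by
        simp only [decide_eq_decide]; omega
      simp only [Function.comp_apply, hd]
    rw [List.countP_congr hcg, pv_countP_range_single]
    have hiff : (J - s < X.length ∧ (X.getD (J - s) ' ' == c) = true)
        ↔ (s ≤ J ∧ J - s < X.length ∧ (X.getD (J - s) ' ' == c) = true) := by
      constructor
      · rintro ⟨h1, h2⟩; exact ⟨hsJ, h1, h2⟩
      · rintro ⟨_, h1, h2⟩; exact ⟨h1, h2⟩
    exact if_congr hiff rfl rfl
  · have hz : ∀ k ∈ List.range X.length,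
        ¬ ((((fun i => decide (i = (J : Int) - (s : Int))) ∘ (fun k : Nat => (k : Int))) k
            && (X.getD k ' ' == c)) = true) := by
      intro k _
      have : ¬ ((k : Int) = (J : Int) - (s : Int)) := by omega
      simp [this]
    rw [List.countP_eq_zero.mpr hz]
    have : ¬ (s ≤ J ∧ J - s < X.length ∧ (X.getD (J - s) ' ' == c) = true) := fun hh => hsJ hh.1
    rw [if_neg this]

-- one more column of the diagonal count
theorem pv_pc_succ (X Y : List Char) (J s : Nat) :
    pvPc X Y (J + 1) s
      = pvPc X Y J s + if s ≤ J ∧ J - s < X.length ∧ (X.getD (J - s) ' ' == Y.getD J ' ') = true then 1 else 0 := by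
  have hbool : ((decide (s ≤ J) && decide (J - s < X.length) && (X.getD (J - s) ' ' == Y.getD J ' ')) = true)
      ↔ (s ≤ J ∧ J - s < X.length ∧ (X.getD (J - s) ' ' == Y.getD J ' ') = true) := by
    simp [and_assoc]
  unfold pvPc
  rw [List.range_succ, List.countP_append]
  congr 1
  simp only [List.countP_cons, List.countP_nil, Nat.zero_add]
  by_cases h : s ≤ J ∧ J - s < X.length ∧ (X.getD (J - s) ' ' == Y.getD J ' ') = true
  · rw [if_pos (hbool.mpr h), if_pos h]
  · have hb : ¬ ((decide (s ≤ J) && decide (J - s < X.length) && (X.getD (J - s) ' ' == Y.getD J ' ')) = true) :=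
      fun hb => h (hbool.mp hb)
    rw [Bool.not_eq_true] at hb
    rw [hb, if_neg h]
    simp

-- the whole matches-building loop of B
theorem pv_outer_fold (X Y : List Char) (LD : Nat) (pos : PySem.Dict Char (List Int))
    (hpos : ∀ c, pos.getD c []
      = ((List.range X.length).filter (fun k => X.getD k ' ' == c)).map (fun k : Nat => (k : Int))) :
    ∀ (J : Nat),
      ((List.range J).foldl (fun ms j =>
          (pos.getD (Y.getD j ' ') []).foldl (fun ms i =>
            if 0 ≤ (j : Int) - i ∧ (j : Int) - i ≤ (LD : Int) then
              PySem.List.pySetD ms ((j : Int) - i) (PySem.List.pyGetD ms ((j : Int) - i) 0 + 1)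
            else ms) ms) (List.replicate (LD + 1) (0 : Int))).length = LD + 1
      ∧ ∀ s : Nat, s ≤ LD →
        PySem.List.pyGetD ((List.range J).foldl (fun ms j =>
          (pos.getD (Y.getD j ' ') []).foldl (fun ms i =>
            if 0 ≤ (j : Int) - i ∧ (j : Int) - i ≤ (LD : Int) then
              PySem.List.pySetD ms ((j : Int) - i) (PySem.List.pyGetD ms ((j : Int) - i) 0 + 1)
            else ms) ms) (List.replicate (LD + 1) (0 : Int))) (s : Int) 0
          = (pvPc X Y J s : Int) := by
  intro J
  induction J with
  | zero =>
    refine ⟨by simp, fun s hs => ?_⟩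
    simp only [List.range_zero, List.foldl_nil]
    rw [PySem.List.pyGetD_natCast, List.getD_eq_getElem?_getD, List.getElem?_replicate]
    have : s < LD + 1 := by omega
    simp [this, pvPc]
  | succ J ih =>
    obtain ⟨hl, he⟩ := ih
    rw [List.range_succ, List.foldl_append, List.foldl_cons, List.foldl_nil]
    obtain ⟨hl', he'⟩ := pv_inner_fold LD (J : Int) (pos.getD (Y.getD J ' ') []) _ hl
    refine ⟨hl', fun s hs => ?_⟩
    rw [he' s hs, he s hs, hpos, pv_hit_count, pv_pc_succ]
    push_cast [apply_ite (fun n : Nat => (n : Int))]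
    ring

-- a list pinned down by its length and entries is a mapped range
theorem pv_list_eq_map (L : List Int) (k : Nat) (g : Nat → Int) (hlen : L.length = k)
    (h : ∀ s, s < k → L.getD s 0 = g s) : L = (List.range k).map g := by
  apply List.ext_getElem (by simp [hlen])
  intro i h1 h2
  have hh := h i (by omega)
  rw [List.getD_eq_getElem?_getD, List.getElem?_eq_getElem h1] at hh
  simpa using hh

-- max of the mapped range as the running max loop
theorem pv_max_eq (k : Nat) (g : Nat → Int) (h0 : 0 ≤ g 0) :
    (PySem.List.max? ((List.range (k + 1)).map g) (fun x => x)).getD 0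
      = (List.range (k + 1)).foldl (fun M s => max M (g s)) 0 := by
  rw [List.range_succ_eq_map, List.map_cons, PySem.List.max?_id_cons]
  simp only [Option.getD_some]
  rw [List.foldl_cons, List.foldl_map, List.foldl_map, List.foldl_map]
  rw [max_eq_right h0]

-- the sum A computes at shift s
theorem pv_mism_sum (X Y : List Char) (s : Nat) (h : s + X.length ≤ Y.length) :
    ((X.zip (Y.drop s)).map (fun xy => if xy.1 ≠ xy.2 then (1 : Int) else 0)).sum
      = (X.length : Int) - (pvMc X Y s : Int) := by
  rw [pv_sum_ite]
  unfold pvMc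
  congr 2
  rw [List.length_zip, List.length_drop]
  omega

-- a count over a long range whose predicate lives on [s, s+n) is a count over range n
theorem pv_countP_range_shift (s n r : Nat) (p : Nat → Bool)
    (hsupp : ∀ j, p j = true → s ≤ j ∧ j < s + n) :
    (List.range (s + (n + r))).countP p = (List.range n).countP (fun i => p (s + i)) := by
  rw [List.range_add, List.countP_append, List.range_add, List.map_append, List.countP_append]
  simp only [List.countP_map]
  have c1 : (List.range s).countP p = 0 := by
    apply List.countP_eq_zero.mpr
    intro j hj hp
    have := hsupp j hp
    have := List.mem_range.mp hj
    omega
  have c3 : (List.range r).countP ((p ∘ (fun x => s + x)) ∘ (fun x => n + x)) = 0 := by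
    apply List.countP_eq_zero.mpr
    intro u hu hp
    simp only [Function.comp_apply] at hp
    have := hsupp _ hp
    omega
  rw [c1, c3]
  simp only [Nat.zero_add, Nat.add_zero]
  apply List.countP_congr
  intro i _
  simp [Function.comp_apply]

-- diagonal count over all of Y equals the shifted match count
theorem pv_pc_eq_mc (X Y : List Char) (s : Nat) (hs : s + X.length ≤ Y.length) :
    pvPc X Y Y.length s = pvMc X Y s := by
  have hmc : pvMc X Y s = (List.range X.length).countP (fun i => X.getD i ' ' == Y.getD (s + i) ' ') := by
    unfold pvMc
    rw [pv_zip_countP]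
    have hmin : min X.length (Y.drop s).length = X.length := by
      rw [List.length_drop]; omega
    rw [hmin]
    apply List.countP_congr
    intro i hi
    have hdg : (Y.drop s).getD i ' ' = Y.getD (s + i) ' ' := by
      rw [List.getD_eq_getElem?_getD, List.getD_eq_getElem?_getD, List.getElem?_drop]
    rw [hdg]
  rw [hmc]
  unfold pvPc
  rw [show Y.length = s + (X.length + (Y.length - s - X.length)) by omega]
  rw [pv_countP_range_shift s X.length (Y.length - s - X.length) _ ?_]
  · apply List.countP_congr
    intro i hi
    have hi' : i < X.length := List.mem_range.mp hi
    have h1 : (decide (s ≤ s + i)) = true := by simp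
    have h2 : s + i - s = i := by omega
    rw [h1, h2]
    simp [hi']
  · intro j hp
    simp only [Bool.and_eq_true, decide_eq_true_eq] at hp
    omega

-- the btrim entry at i
theorem pv_btrim_getD (X Y : List Char) (hlen : X.length ≤ Y.length)
    (i : Nat) (hi : i < X.length) :
    (Y.take (X.length / 2) ++ Y.drop (Y.length - (X.length - X.length / 2))).getD i ' '
      = (if i < X.length / 2 then Y.getD i ' ' else Y.getD (Y.length - X.length + i) ' ') := by
  by_cases h2 : i < X.length / 2
  · rw [if_pos h2]
    have h1 : i < (Y.take (X.length / 2)).length := by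
      rw [List.length_take]; omega
    rw [List.getD_eq_getElem?_getD, List.getElem?_append_left h1, List.getElem?_take,
      if_pos h2, List.getD_eq_getElem?_getD]
  · rw [if_neg h2]
    have h1 : (Y.take (X.length / 2)).length ≤ i := by
      rw [List.length_take]; omega
    rw [List.getD_eq_getElem?_getD, List.getElem?_append_right h1, List.getElem?_drop,
      List.length_take]
    have : Y.length - (X.length - X.length / 2) + (i - min (X.length / 2) Y.length)
        = Y.length - X.length + i := by omega
    rw [this, List.getD_eq_getElem?_getD]

-- minimum as an if the Python way
theorem pv_if_min (a b : Int) : (if b < a then b else a) = min a b := by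
  rw [min_def]; split_ifs <;> omega

-- main per-call equalities (X the shorter list)
theorem pv_A_val (X Y : List Char) (hX : X ≠ []) (hlen : X.length ≤ Y.length) :
    cpmGoA X Y = min (pvShiftMin X Y) (pvBulge X Y) := by
  have hn1 : 0 < X.length := by
    cases X
    · exact absurd rfl hX
    · simp
  simp only [cpmGoA]
  rw [show (Y.length : Int) - (X.length : Int) + 1 = ((Y.length - X.length + 1 : Nat) : Int) by omega]
  rw [PySem.List.pyRange_zero_nat, List.foldl_map]
  have hfoldA :
      List.foldl
        (fun (x : Int) (y : Nat) =>
          if ((X.zip (PySem.List.slice Y (some ((y : Nat) : Int)) none)).map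
                (fun xy => if xy.1 ≠ xy.2 then (1 : Int) else 0)).sum < x then
            ((X.zip (PySem.List.slice Y (some ((y : Nat) : Int)) none)).map
                (fun xy => if xy.1 ≠ xy.2 then (1 : Int) else 0)).sum
          else x)
        ((X.length : Int)) (List.range (Y.length - X.length + 1))
      = List.foldl
          (fun (mn : Int) (s : Nat) =>
            if (X.length : Int) - ((pvMc X Y s : Int)) < mn then
              (X.length : Int) - ((pvMc X Y s : Int))
            else mn)
          ((X.length : Int)) (List.range (Y.length - X.length + 1)) := by
    apply PySem.List.foldl_congr_mem
    intro mn s hs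
    have hs' : s < Y.length - X.length + 1 := List.mem_range.mp hs
    rw [PySem.List.slice_from_natCast, pv_mism_sum X Y s (by omega)]
  rw [hfoldA]
  have hmm := pv_foldl_min_max (fun s => ((pvMc X Y s : Int))) (X.length : Int)
      (List.range (Y.length - X.length + 1)) 0
  rw [sub_zero] at hmm
  rw [hmm]
  rw [show PySem.Int.floordiv ((X.length : Int)) 2 = ((X.length / 2 : Nat) : Int) by
    exact_mod_cast PySem.Int.floordiv_natCast X.length 2]
  rw [show (X.length : Int) - ((X.length / 2 : Nat) : Int) = ((X.length - X.length / 2 : Nat) : Int) by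
    omega]
  rw [PySem.List.slice_to_natCast]
  rw [PySem.List.slice_from_neg_natCast Y (X.length - X.length / 2) (by omega)]
  rw [pv_sum_ite, pv_zip_countP]
  rw [show (X.zip (Y.take (X.length / 2) ++ Y.drop (Y.length - (X.length - X.length / 2)))).length
      = X.length by
    rw [List.length_zip, List.length_append, List.length_take, List.length_drop]; omega]
  rw [show min X.length (Y.take (X.length / 2) ++ Y.drop (Y.length - (X.length - X.length / 2))).length
      = X.length by
    rw [List.length_append, List.length_take, List.length_drop]; omega]
  rw [List.countP_congr (fun i hi => by
    rw [pv_btrim_getD X Y hlen i (List.mem_range.mp hi)])]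
  rw [pv_if_min]
  rfl

theorem pv_B_val (X Y : List Char) (hX : X ≠ []) (hlen : X.length ≤ Y.length) :
    cpmGoB X Y = min (pvShiftMin X Y) (pvBulge X Y) := by
  have hn1 : 0 < X.length := by
    cases X
    · exact absurd rfl hX
    · simp
  simp only [cpmGoB]
  rw [show (Y.length : Int) - (X.length : Int) = ((Y.length - X.length : Nat) : Int) by omega]
  rw [show ((Y.length - X.length : Nat) : Int) + 1 = ((Y.length - X.length + 1 : Nat) : Int) by omega]
  rw [PySem.List.pyRepeat_singleton]
  rw [show (((Y.length - X.length + 1 : Nat) : Int)).toNat = Y.length - X.length + 1 by omega]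
  rw [PySem.List.pyRange_zero_nat, List.foldl_map]
  simp only [PySem.List.pyGetD_natCast]
  have hmtch := pv_outer_fold X Y (Y.length - X.length)
      ((PySem.List.enumerate X 0).foldl
        (fun d ic => d.modify ic.2 [] (fun l => l ++ [ic.1])) PySem.Dict.empty)
      (fun c => pv_pos_getD X c) Y.length
  obtain ⟨hl, he⟩ := hmtch
  rw [pv_list_eq_map _ (Y.length - X.length + 1) (fun s => ((pvMc X Y s : Int))) hl
      (fun s hs => by
        have h1 := he s (by omega)
        rw [PySem.List.pyGetD_natCast] at h1
        rw [h1, pv_pc_eq_mc X Y s (by omega)])]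
  rw [pv_max_eq (Y.length - X.length) (fun s => ((pvMc X Y s : Int))) (Int.natCast_nonneg _)]
  -- bulge loop
  rw [show PySem.Int.floordiv ((X.length : Int)) 2 = ((X.length / 2 : Nat) : Int) by
    exact_mod_cast PySem.Int.floordiv_natCast X.length 2]
  rw [PySem.List.pyRange_zero_nat, List.foldl_map]
  simp only [PySem.List.pyGetD_natCast]
  have hfoldB :
      List.foldl
        (fun (x : Int) (y : Nat) =>
          if X.getD y ' ' ≠
              (if ((y : Nat) : Int) < ((X.length / 2 : Nat) : Int) then Y.getD y ' '
               else PySem.List.pyGetD Y (((Y.length - X.length : Nat) : Int) + ((y : Nat) : Int)) ' ')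
          then x + 1 else x)
        (0 : Int) (List.range X.length)
      = List.foldl
          (fun (acc : Int) (i : Nat) =>
            if ¬ ((X.getD i ' ' == (if i < X.length / 2 then Y.getD i ' ' else Y.getD (Y.length - X.length + i) ' ')) = true)
            then acc + 1 else acc)
          (0 : Int) (List.range X.length) := by
    apply PySem.List.foldl_congr_mem
    intro acc i hi
    have hcnd : (((i : Nat) : Int) < ((X.length / 2 : Nat) : Int)) = ((i : Nat) < X.length / 2) :=
      propext (by omega)
    have hidx : ((Y.length - X.length : Nat) : Int) + ((i : Nat) : Int)
        = ((Y.length - X.length + i : Nat) : Int) := by push_cast; ring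
    simp only [hcnd, hidx, PySem.List.pyGetD_natCast]
    by_cases hc : X.getD i ' '
        = (if i < X.length / 2 then Y.getD i ' ' else Y.getD (Y.length - X.length + i) ' ')
    · have hbeq : (X.getD i ' '
          == (if i < X.length / 2 then Y.getD i ' ' else Y.getD (Y.length - X.length + i) ' ')) = true := by
        rw [hc]
        exact beq_self_eq_true _
      rw [if_neg (fun h => h hc), if_neg (fun h => h hbeq)]
    · have hbeq : ¬ ((X.getD i ' '
          == (if i < X.length / 2 then Y.getD i ' ' else Y.getD (Y.length - X.length + i) ' ')) = true) := by
        intro hb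
        exact hc (eq_of_beq hb)
      rw [if_pos hc, if_pos hbeq]
  rw [hfoldB]
  rw [PySem.List.foldl_ite_add_one
      (fun i => ¬ ((X.getD i ' ' == (if i < X.length / 2 then Y.getD i ' ' else Y.getD (Y.length - X.length + i) ' ')) = true))]
  rw [zero_add]
  -- turn the mismatch count into length minus match count
  unfold pvShiftMin pvBulge
  congr 1
  have hcnt := List.length_eq_countP_add_countP
      (fun i => X.getD i ' ' == (if i < X.length / 2 then Y.getD i ' ' else Y.getD (Y.length - X.length + i) ' '))
      (l := List.range X.length)
  rw [List.length_range] at hcnt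
  have hcg : (List.range X.length).countP
        (fun i => decide (¬ ((X.getD i ' ' == (if i < X.length / 2 then Y.getD i ' ' else Y.getD (Y.length - X.length + i) ' ')) = true)))
      = (List.range X.length).countP
        (fun a => decide (¬ ((fun i => X.getD i ' ' == (if i < X.length / 2 then Y.getD i ' ' else Y.getD (Y.length - X.length + i) ' ')) a) = true)) := rfl
  rw [hcg]
  omega

theorem pv_go_eq (X Y : List Char) (hlen : X.length ≤ Y.length) (hne : X = [] → Y = []) :
    cpmGoA X Y = cpmGoB X Y := by
  by_cases hX : X = []
  · have hY := hne hX
    subst hX; subst hY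
    decide
  · rw [pv_A_val X Y hX hlen, pv_B_val X Y hX hlen]

-- ===== VERDICT (by name: the statement is the Claim_ definition above) =====
theorem count_peptide_mismatches_spec : Claim_equal_count_peptide_mismatches := by
  intro a b _ hpre
  unfold Spec_count_peptide_mismatches count_peptide_mismatches count_peptide_mismatches_alt
  unfold Pre_count_peptide_mismatches at hpre
  by_cases h : a.toList.length > b.toList.length
  · rw [if_pos h, if_pos h]
    exact pv_go_eq b.toList a.toList (by omega) (fun hb => hpre.mpr hb)
  · rw [if_neg h, if_neg h]
    exact pv_go_eq a.toList b.toList (by omega) (fun ha => hpre.mp ha)
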